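-- pv_equiv track=rewrite | github.com/Anshumanrajpurohit/C4C_OffRamp | plant-search/engine/scorer.py | _levels_close
-- ===== SOURCE A (Python) =====
-- UMAMI_LEVEL_GROUPS = [
--     {"delicate", "subtle", "light"},
--     {"balanced", "medium", "moderate"},
--     {"rich", "deep", "savory"},
--     {"strong", "bold", "intense"},
-- ]
--
-- def _levels_close(a: str, b: str) -> bool:
--     a = a or ""
--     b = b or ""
--     if a == b:
--         return True
--     for group in UMAMI_LEVEL_GROUPS:
--         if a in group and b in group:
--             return True
--     return False
-- ===== SOURCE B (Python) =====
-- # B: canonicalize each word to its group's representative, then compare canonical forms.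
-- # Correct because the representatives of distinct groups differ, and an unknown word
-- # canonicalizes to itself (it can only equal a representative if it were in that group).
-- CANON = {
--     "delicate": "delicate", "subtle": "delicate", "light": "delicate",
--     "balanced": "balanced", "medium": "balanced", "moderate": "balanced",
--     "rich": "rich", "deep": "rich", "savory": "rich",
--     "strong": "strong", "bold": "strong", "intense": "strong",
-- }
--
-- def _canon(w):
--     w = w or ""
--     return CANON.get(w, w)
--
-- def _levels_close(a: str, b: str) -> bool:
--     return _canon(a) == _canon(b)
-- ===== Notes on version B (the rewrite author's own statement) =====
-- stated objective: simpler
-- what changed: B canonicalizes each word to its group's representative and returns a single equality of canonical forms, eliminating A's a==b short-circuit and its search over group pairs entirely.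
import Mathlib
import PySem

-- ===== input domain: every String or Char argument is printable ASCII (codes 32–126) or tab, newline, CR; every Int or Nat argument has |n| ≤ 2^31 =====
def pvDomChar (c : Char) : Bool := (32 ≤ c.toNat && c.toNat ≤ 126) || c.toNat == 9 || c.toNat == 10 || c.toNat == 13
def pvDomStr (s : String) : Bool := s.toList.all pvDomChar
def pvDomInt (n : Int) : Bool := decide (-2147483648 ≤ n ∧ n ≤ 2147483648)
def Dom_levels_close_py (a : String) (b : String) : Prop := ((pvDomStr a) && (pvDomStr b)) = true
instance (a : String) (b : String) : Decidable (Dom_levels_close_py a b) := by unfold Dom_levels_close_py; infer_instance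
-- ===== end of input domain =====

-- B canonicalizes each word to its group's representative and compares canonical forms,
-- replacing A's short-circuit plus scan over group pairs by one equality (simpler).

-- ===== PORT A =====
def umamiLevelGroups : List (PySem.Set String) :=
  [ PySem.Set.ofList ["delicate", "subtle", "light"],
    PySem.Set.ofList ["balanced", "medium", "moderate"],
    PySem.Set.ofList ["rich", "deep", "savory"],
    PySem.Set.ofList ["strong", "bold", "intense"] ]

-- the 'for group in UMAMI_LEVEL_GROUPS' loop with its early 'return True'
def levelsLoop (a b : String) : List (PySem.Set String) → Bool
  | [] => false
  | g :: rest =>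
    if PySem.Set.contains g a && PySem.Set.contains g b then true
    else levelsLoop a b rest

def levels_close_py (a : String) (b : String) : Bool :=
  let a := if a = "" then "" else a   -- a = a or ""
  let b := if b = "" then "" else b   -- b = b or ""
  if a = b then true
  else levelsLoop a b umamiLevelGroups

-- ===== PORT B =====
-- CANON: word -> its group's representative
def canonTable : PySem.Dict String String :=
  PySem.Dict.ofList
    [ ("delicate", "delicate"), ("subtle", "delicate"), ("light", "delicate"),
      ("balanced", "balanced"), ("medium", "balanced"), ("moderate", "balanced"),
      ("rich", "rich"), ("deep", "rich"), ("savory", "rich"),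
      ("strong", "strong"), ("bold", "strong"), ("intense", "strong") ]

def canonB (w : String) : String :=
  let w := if w = "" then "" else w   -- w = w or ""
  canonTable.getD w w                 -- CANON.get(w, w)

def levels_close_py_alt (a : String) (b : String) : Bool :=
  canonB a == canonB b

-- ===== PRECONDITION & SPEC =====
def Spec_levels_close_py (a : String) (b : String) (out : Bool) : Prop := out = levels_close_py_alt a b
instance (a : String) (b : String) (out : Bool) : Decidable (Spec_levels_close_py a b out) := by unfold Spec_levels_close_py; infer_instance

-- ===== CLAIM (what is proved, stated in full; the proofs are below) =====
def Claim_equal_levels_close_py : Prop := ∀ (a : String) (b : String), Dom_levels_close_py a b → Spec_levels_close_py a b (levels_close_py a b)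

-- ===== LEMMAS AND PROOFS =====

theorem norm_id (s : String) : (if s = "" then "" else s) = s := by
  split_ifs with h
  · exact h.symm
  · rfl

def mem0 (a : String) : Prop := a = "delicate" ∨ a = "subtle" ∨ a = "light"
def mem1 (a : String) : Prop := a = "balanced" ∨ a = "medium" ∨ a = "moderate"
def mem2 (a : String) : Prop := a = "rich" ∨ a = "deep" ∨ a = "savory"
def mem3 (a : String) : Prop := a = "strong" ∨ a = "bold" ∨ a = "intense"

theorem canonTable_eq : canonTable = PySem.Dict.mk
    [ ("delicate", "delicate"), ("subtle", "delicate"), ("light", "delicate"),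
      ("balanced", "balanced"), ("medium", "balanced"), ("moderate", "balanced"),
      ("rich", "rich"), ("deep", "rich"), ("savory", "rich"),
      ("strong", "strong"), ("bold", "strong"), ("intense", "strong") ] := rfl

-- every string is in exactly one group (canonB giving that group's representative) or in none
theorem classify (a : String) :
    (canonB a = "delicate" ∧ mem0 a ∧ ¬ mem1 a ∧ ¬ mem2 a ∧ ¬ mem3 a) ∨
    (canonB a = "balanced" ∧ ¬ mem0 a ∧ mem1 a ∧ ¬ mem2 a ∧ ¬ mem3 a) ∨
    (canonB a = "rich" ∧ ¬ mem0 a ∧ ¬ mem1 a ∧ mem2 a ∧ ¬ mem3 a) ∨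
    (canonB a = "strong" ∧ ¬ mem0 a ∧ ¬ mem1 a ∧ ¬ mem2 a ∧ mem3 a) ∨
    (canonB a = a ∧ ¬ mem0 a ∧ ¬ mem1 a ∧ ¬ mem2 a ∧ ¬ mem3 a) := by
  by_cases h1 : a = "delicate"; · subst h1; left; refine ⟨by decide, ?_⟩; simp [mem0, mem1, mem2, mem3]
  by_cases h2 : a = "subtle"; · subst h2; left; refine ⟨by decide, ?_⟩; simp [mem0, mem1, mem2, mem3]
  by_cases h3 : a = "light"; · subst h3; left; refine ⟨by decide, ?_⟩; simp [mem0, mem1, mem2, mem3]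
  by_cases h4 : a = "balanced"; · subst h4; right; left; refine ⟨by decide, ?_⟩; simp [mem0, mem1, mem2, mem3]
  by_cases h5 : a = "medium"; · subst h5; right; left; refine ⟨by decide, ?_⟩; simp [mem0, mem1, mem2, mem3]
  by_cases h6 : a = "moderate"; · subst h6; right; left; refine ⟨by decide, ?_⟩; simp [mem0, mem1, mem2, mem3]
  by_cases h7 : a = "rich"; · subst h7; right; right; left; refine ⟨by decide, ?_⟩; simp [mem0, mem1, mem2, mem3]
  by_cases h8 : a = "deep"; · subst h8; right; right; left; refine ⟨by decide, ?_⟩; simp [mem0, mem1, mem2, mem3]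
  by_cases h9 : a = "savory"; · subst h9; right; right; left; refine ⟨by decide, ?_⟩; simp [mem0, mem1, mem2, mem3]
  by_cases h10 : a = "strong"; · subst h10; right; right; right; left; refine ⟨by decide, ?_⟩; simp [mem0, mem1, mem2, mem3]
  by_cases h11 : a = "bold"; · subst h11; right; right; right; left; refine ⟨by decide, ?_⟩; simp [mem0, mem1, mem2, mem3]
  by_cases h12 : a = "intense"; · subst h12; right; right; right; left; refine ⟨by decide, ?_⟩; simp [mem0, mem1, mem2, mem3]
  refine Or.inr (Or.inr (Or.inr (Or.inr ⟨?_, ?_, ?_, ?_, ?_⟩)))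
  · unfold canonB
    rw [norm_id]
    simp [canonTable_eq, PySem.Dict.getD, PySem.Dict.get?, beq_iff_eq,
      Ne.symm h1, Ne.symm h2, Ne.symm h3, Ne.symm h4, Ne.symm h5, Ne.symm h6,
      Ne.symm h7, Ne.symm h8, Ne.symm h9, Ne.symm h10, Ne.symm h11, Ne.symm h12]
  · simp [mem0, h1, h2, h3]
  · simp [mem1, h4, h5, h6]
  · simp [mem2, h7, h8, h9]
  · simp [mem3, h10, h11, h12]

-- ===== VERDICT (by name: the statement is the Claim_ definition above) =====
theorem levels_close_py_spec : Claim_equal_levels_close_py := by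
  intro a b _
  unfold Spec_levels_close_py levels_close_py levels_close_py_alt
  simp only [norm_id]
  by_cases hab : a = b
  · simp [hab]
  · simp only [hab, if_false]
    rcases classify a with ⟨ha, ha0, ha1, ha2, ha3⟩|⟨ha, ha0, ha1, ha2, ha3⟩|⟨ha, ha0, ha1, ha2, ha3⟩|⟨ha, ha0, ha1, ha2, ha3⟩|⟨ha, ha0, ha1, ha2, ha3⟩ <;>
    rcases classify b with ⟨hb, hb0, hb1, hb2, hb3⟩|⟨hb, hb0, hb1, hb2, hb3⟩|⟨hb, hb0, hb1, hb2, hb3⟩|⟨hb, hb0, hb1, hb2, hb3⟩|⟨hb, hb0, hb1, hb2, hb3⟩ <;>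
    simp_all [levelsLoop, umamiLevelGroups, PySem.Set.ofList, PySem.Set.contains,
      mem0, mem1, mem2, mem3] <;>
    first
      | exact fun h => hb0.1 h.symm
      | exact fun h => hb1.1 h.symm
      | exact fun h => hb2.1 h.symm
      | exact fun h => hb3.1 h.symm
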